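-- pv_equiv track=rewrite | github.com/C-C-Coalback/Conquest-LCG-server | DeckHandling.py | check_ally
-- ===== SOURCE A (Python) =====
-- def check_ally(req_faction, ally):
--     faction_wheel = ["Astra Militarum", "Space Marines", "Tau", "Eldar",
--                      "Dark Eldar", "Chaos", "Orks"]
--     pos_req_faction = -1
--     pos_ally = -1
--     for pos in [pos for pos,faction in enumerate(faction_wheel) if faction == req_faction]:
--         pos_req_faction = pos
--     for pos in [pos for pos,faction in enumerate(faction_wheel) if faction == ally]:
--         pos_ally = pos
--     if pos_req_faction == -1 or pos_ally == -1:
--         return False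
--     pos_distance = abs(pos_req_faction - pos_ally)
--     if pos_distance == 6 or pos_distance == 1:
--         return True
--     return False
-- ===== SOURCE B (Python) =====
-- _WHEEL = ["Astra Militarum", "Space Marines", "Tau", "Eldar",
--           "Dark Eldar", "Chaos", "Orks"]
-- # Static adjacency table: each faction maps to its two cyclic neighbors on the wheel.
-- _NEIGHBORS = {name: frozenset((_WHEEL[(i - 1) % 7], _WHEEL[(i + 1) % 7]))
--               for i, name in enumerate(_WHEEL)}
--
--
-- def check_ally(req_faction, ally):
--     return ally in _NEIGHBORS.get(req_faction, frozenset())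
-- ===== Notes on version B (the rewrite author's own statement) =====
-- stated objective: simpler
-- what changed: Replaces the two enumerate-scan position searches and the abs-distance-1-or-6 test with a static adjacency table built once from the wheel (name -> frozenset of its two cyclic neighbors); check_ally is a single membership test with no index arithmetic.
import Mathlib
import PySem

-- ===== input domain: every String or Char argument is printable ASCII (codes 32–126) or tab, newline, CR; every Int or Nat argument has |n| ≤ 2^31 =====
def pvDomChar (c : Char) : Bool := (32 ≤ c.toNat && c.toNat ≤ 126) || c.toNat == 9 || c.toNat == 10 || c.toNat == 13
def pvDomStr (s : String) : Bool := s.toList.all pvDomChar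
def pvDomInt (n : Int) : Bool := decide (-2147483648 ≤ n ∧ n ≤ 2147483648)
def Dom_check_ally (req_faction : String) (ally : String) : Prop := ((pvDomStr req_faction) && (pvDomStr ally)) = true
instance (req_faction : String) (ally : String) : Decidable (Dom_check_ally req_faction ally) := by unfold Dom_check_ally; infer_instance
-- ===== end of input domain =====

-- B replaces A's two position scans + abs-distance test by a precomputed cyclic-neighbor
-- table and a single membership lookup (objective: simpler).

-- ===== PORT A =====

def check_ally (req_faction : String) (ally : String) : Bool :=
  let faction_wheel : List String :=
    ["Astra Militarum", "Space Marines", "Tau", "Eldar", "Dark Eldar", "Chaos", "Orks"]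
  let pos_req_faction : Int :=
    (((PySem.List.enumerate faction_wheel).filter (fun p => p.2 == req_faction)).map
      (fun p => p.1)).foldl (fun _ pos => pos) (-1)
  let pos_ally : Int :=
    (((PySem.List.enumerate faction_wheel).filter (fun p => p.2 == ally)).map
      (fun p => p.1)).foldl (fun _ pos => pos) (-1)
  if pos_req_faction == -1 || pos_ally == -1 then false
  else
    let pos_distance : Int := |pos_req_faction - pos_ally|
    if pos_distance == 6 || pos_distance == 1 then true
    else false

-- ===== PORT B =====
def pvWheel : List String :=
  ["Astra Militarum", "Space Marines", "Tau", "Eldar", "Dark Eldar", "Chaos", "Orks"]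

def pvNeighbors : PySem.Dict String (PySem.Set String) :=
  (PySem.List.enumerate pvWheel).foldl
    (fun d p =>
      d.insert p.2 (PySem.Set.ofList
        [PySem.List.pyGetD pvWheel (PySem.Int.mod (p.1 - 1) 7) "",
         PySem.List.pyGetD pvWheel (PySem.Int.mod (p.1 + 1) 7) ""]))
    PySem.Dict.empty

def check_ally_alt (req_faction : String) (ally : String) : Bool :=
  PySem.Set.contains (pvNeighbors.getD req_faction PySem.Set.empty) ally


-- ===== PRECONDITION & SPEC =====
def Spec_check_ally (req_faction : String) (ally : String) (out : Bool) : Prop := out = check_ally_alt req_faction ally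
instance (req_faction : String) (ally : String) (out : Bool) : Decidable (Spec_check_ally req_faction ally out) := by unfold Spec_check_ally; infer_instance

-- ===== CLAIM (what is proved, stated in full; the proofs are below) =====
def Claim_equal_check_ally : Prop := ∀ (req_faction : String) (ally : String), Dom_check_ally req_faction ally → Spec_check_ally req_faction ally (check_ally req_faction ally)

-- ===== LEMMAS AND PROOFS =====
lemma pv_str_cases (s : String) : s = "Astra Militarum" ∨ s = "Space Marines" ∨ s = "Tau" ∨ s = "Eldar" ∨ s = "Dark Eldar" ∨ s = "Chaos" ∨ s = "Orks" ∨ (s ≠ "Astra Militarum" ∧ s ≠ "Space Marines" ∧ s ≠ "Tau" ∧ s ≠ "Eldar" ∧ s ≠ "Dark Eldar" ∧ s ≠ "Chaos" ∧ s ≠ "Orks") := by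
  by_cases h1 : s = "Astra Militarum"; · exact Or.inl h1
  by_cases h2 : s = "Space Marines"; · exact Or.inr (Or.inl h2)
  by_cases h3 : s = "Tau"; · exact Or.inr (Or.inr (Or.inl h3))
  by_cases h4 : s = "Eldar"; · exact Or.inr (Or.inr (Or.inr (Or.inl h4)))
  by_cases h5 : s = "Dark Eldar"; · exact Or.inr (Or.inr (Or.inr (Or.inr (Or.inl h5))))
  by_cases h6 : s = "Chaos"; · exact Or.inr (Or.inr (Or.inr (Or.inr (Or.inr (Or.inl h6)))))
  by_cases h7 : s = "Orks"; · exact Or.inr (Or.inr (Or.inr (Or.inr (Or.inr (Or.inr (Or.inl h7))))))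
  exact Or.inr (Or.inr (Or.inr (Or.inr (Or.inr (Or.inr (Or.inr ⟨h1, h2, h3, h4, h5, h6, h7⟩))))))

lemma pv_posA (s : String) :
    (((PySem.List.enumerate ["Astra Militarum", "Space Marines", "Tau", "Eldar", "Dark Eldar", "Chaos", "Orks"]).filter (fun p => p.2 == s)).map (fun p => p.1)).foldl (fun _ pos => pos) (-1 : Int)
    = if s = "Astra Militarum" then 0 else if s = "Space Marines" then 1 else if s = "Tau" then 2
      else if s = "Eldar" then 3 else if s = "Dark Eldar" then 4 else if s = "Chaos" then 5
      else if s = "Orks" then 6 else -1 := by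
  rcases pv_str_cases s with h|h|h|h|h|h|h|⟨r1,r2,r3,r4,r5,r6,r7⟩ <;> subst_vars
  · decide
  · decide
  · decide
  · decide
  · decide
  · decide
  · decide
  · have e1 : ("Astra Militarum" == s) = false := by simp [Ne.symm r1]
    have e2 : ("Space Marines" == s) = false := by simp [Ne.symm r2]
    have e3 : ("Tau" == s) = false := by simp [Ne.symm r3]
    have e4 : ("Eldar" == s) = false := by simp [Ne.symm r4]
    have e5 : ("Dark Eldar" == s) = false := by simp [Ne.symm r5]
    have e6 : ("Chaos" == s) = false := by simp [Ne.symm r6]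
    have e7 : ("Orks" == s) = false := by simp [Ne.symm r7]
    simp [PySem.List.enumerate_cons, PySem.List.enumerate_nil, List.filter,
      e1, e2, e3, e4, e5, e6, e7, r1, r2, r3, r4, r5, r6, r7]

lemma pv_nbB (s : String) :
    pvNeighbors.getD s PySem.Set.empty
    = if s = "Astra Militarum" then ["Orks", "Space Marines"]
      else if s = "Space Marines" then ["Astra Militarum", "Tau"]
      else if s = "Tau" then ["Space Marines", "Eldar"]
      else if s = "Eldar" then ["Tau", "Dark Eldar"]
      else if s = "Dark Eldar" then ["Eldar", "Chaos"]
      else if s = "Chaos" then ["Dark Eldar", "Orks"]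
      else if s = "Orks" then ["Chaos", "Astra Militarum"]
      else PySem.Set.empty := by
  rcases pv_str_cases s with h|h|h|h|h|h|h|⟨r1,r2,r3,r4,r5,r6,r7⟩ <;> subst_vars
  · decide
  · decide
  · decide
  · decide
  · decide
  · decide
  · decide
  · simp [pvNeighbors, pvWheel, PySem.List.enumerate_cons, PySem.List.enumerate_nil,
      List.foldl, PySem.Dict.getD_insert, PySem.Dict.getD_empty, PySem.Set.empty,
      r1, r2, r3, r4, r5, r6, r7]


-- ===== VERDICT (by name: the statement is the Claim_ definition above) =====
theorem check_ally_spec : Claim_equal_check_ally := by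
  intro req ally _
  unfold Spec_check_ally
  simp only [check_ally, check_ally_alt, pv_posA, pv_nbB]
  rcases pv_str_cases req with h|h|h|h|h|h|h|⟨r1,r2,r3,r4,r5,r6,r7⟩ <;>
    rcases pv_str_cases ally with g|g|g|g|g|g|g|⟨a1,a2,a3,a4,a5,a6,a7⟩ <;> subst_vars <;>
    first
      | decide
      | simp_all [PySem.Set.empty]
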